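-- pv_equiv track=rewrite | github.com/nDiv/cellular_automata | scripts/python/cellular_automaton.py | state2num
-- ===== SOURCE A (Python) =====
-- def state2num(state):
-- 	"""
-- 	Returns a n**2-bit number that represents the state,
-- 	where n is the size of the nxn state.
-- 	"""
--
-- 	n = len(state)
-- 	weight = 0
-- 	num = 0
-- 	for i in range(n):
-- 		for j in state[i]:
-- 			num = num + (2**weight)*j
-- 			weight = weight+1
--
-- 	return num
-- ===== SOURCE B (Python) =====
-- def state2num(state):
--     bits = [j for row in state for j in row]
--     num = 0
--     for b in reversed(bits):
--         num = num * 2 + b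
--     return num
-- ===== Notes on version B (the rewrite author's own statement) =====
-- stated objective: simpler
-- what changed: Flattens the grid row-major and folds it in reverse with Horner's rule (num = num*2 + b), eliminating the weight counter and the 2**weight exponentiation of A's nested indexed loops.
import Mathlib
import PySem

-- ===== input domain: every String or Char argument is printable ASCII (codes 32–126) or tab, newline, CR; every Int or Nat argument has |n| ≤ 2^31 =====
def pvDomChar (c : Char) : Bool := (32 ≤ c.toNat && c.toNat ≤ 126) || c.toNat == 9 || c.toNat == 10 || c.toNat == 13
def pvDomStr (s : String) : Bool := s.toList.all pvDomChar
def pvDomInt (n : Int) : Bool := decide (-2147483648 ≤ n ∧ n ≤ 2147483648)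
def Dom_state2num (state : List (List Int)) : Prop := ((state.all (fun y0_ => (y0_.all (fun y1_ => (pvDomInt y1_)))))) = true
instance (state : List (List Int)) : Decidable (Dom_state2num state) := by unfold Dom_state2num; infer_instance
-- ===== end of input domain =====

-- B replaces A's weight counter and 2**weight exponentiation by a reverse Horner fold over the flattened grid (objective: simpler).

-- ===== PORT A =====
-- nested loops: for i in range(n): for j in state[i]: num += 2**weight * j; weight += 1
def state2num (state : List (List Int)) : Int :=
  (state.foldl
    (fun (acc : Int × Nat) row =>
      row.foldl (fun (q : Int × Nat) j => (q.1 + (2 : Int) ^ q.2 * j, q.2 + 1)) acc)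
    (0, 0)).1

-- ===== PORT B =====
-- bits = [j for row in state for j in row]; for b in reversed(bits): num = num*2 + b
def state2num_alt (state : List (List Int)) : Int :=
  ((state.flatMap (fun row => row)).reverse).foldl (fun num b => num * 2 + b) 0

-- ===== PRECONDITION & SPEC =====
def Spec_state2num (state : List (List Int)) (out : Int) : Prop := out = state2num_alt state
instance (state : List (List Int)) (out : Int) : Decidable (Spec_state2num state out) := by unfold Spec_state2num; infer_instance

-- ===== CLAIM (what is proved, stated in full; the proofs are below) =====
def Claim_equal_state2num : Prop := ∀ (state : List (List Int)), Dom_state2num state → Spec_state2num state (state2num state)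

-- ===== LEMMAS AND PROOFS =====

-- Horner value of a bit list (B's fold applied to one list, accumulator 0)
def pvH (l : List Int) : Int := l.reverse.foldl (fun num b => num * 2 + b) 0

theorem pvH_acc (l : List Int) : ∀ acc : Int,
    l.reverse.foldl (fun num b => num * 2 + b) acc = acc * 2 ^ l.length + pvH l := by
  induction l with
  | nil => intro acc; simp [pvH]
  | cons b t ih =>
    intro acc
    simp only [List.reverse_cons, List.foldl_append, List.foldl_cons, List.foldl_nil, pvH,
      List.length_cons]
    rw [ih acc, ih 0]
    ring

theorem pvH_append (l₁ l₂ : List Int) :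
    pvH (l₁ ++ l₂) = pvH l₁ + 2 ^ l₁.length * pvH l₂ := by
  simp only [pvH, List.reverse_append, List.foldl_append]
  rw [pvH_acc l₁ (List.foldl (fun num b => num * 2 + b) 0 l₂.reverse)]
  show pvH l₂ * 2 ^ l₁.length + pvH l₁ = pvH l₁ + 2 ^ l₁.length * pvH l₂
  ring

theorem pv_row (row : List Int) : ∀ (num : Int) (w : Nat),
    row.foldl (fun (q : Int × Nat) j => (q.1 + (2 : Int) ^ q.2 * j, q.2 + 1)) (num, w)
      = (num + 2 ^ w * pvH row, w + row.length) := by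
  induction row with
  | nil => intro num w; simp [pvH]
  | cons b t ih =>
    intro num w
    simp only [List.foldl_cons]
    rw [ih]
    have hb : pvH (b :: t) = 2 * pvH t + b := by
      simp only [pvH, List.reverse_cons, List.foldl_append, List.foldl_cons, List.foldl_nil]
      rw [pvH_acc t 0]
      ring
    simp only [Prod.mk.injEq]; constructor
    · rw [hb]; ring_nf
    · simp [List.length_cons]; omega

theorem pv_main (state : List (List Int)) : ∀ (num : Int) (w : Nat),
    state.foldl
      (fun (acc : Int × Nat) row =>
        row.foldl (fun (q : Int × Nat) j => (q.1 + (2 : Int) ^ q.2 * j, q.2 + 1)) acc)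
      (num, w)
      = (num + 2 ^ w * pvH (state.flatMap (fun row => row)),
         w + (state.flatMap (fun row => row)).length) := by
  induction state with
  | nil => intro num w; simp [pvH]
  | cons r rs ih =>
    intro num w
    simp only [List.foldl_cons]
    rw [pv_row, ih]
    simp only [List.flatMap_cons, pvH_append, List.length_append]
    simp only [Prod.mk.injEq]; constructor
    · rw [pow_add]; ring
    · omega

-- ===== VERDICT (by name: the statement is the Claim_ definition above) =====
theorem state2num_spec : Claim_equal_state2num := by
  intro state _
  show state2num state = state2num_alt state
  unfold state2num state2num_alt
  rw [pv_main]
  show 0 + 2 ^ 0 * pvH _ = pvH _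
  simp
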